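-- pv_equiv track=rewrite | github.com/ReZxT/Accel | agents/preprocessed_agent.py | _format_log_chunks
-- ===== SOURCE A (Python) =====
-- def _format_log_chunks(chunks: list[dict]) -> str:
--     by_level: dict[str, list[str]] = {}
--     for chunk in chunks:
--         level = chunk.get("level", "UNKNOWN")
--         by_level.setdefault(level, []).append(chunk.get("text", ""))
--
--     parts = []
--     for level in ["ERROR", "CRITICAL", "FATAL", "WARN", "WARNING", "INFO", "DEBUG", "UNKNOWN"]:
--         if level in by_level:
--             entries = by_level[level]
--             parts.append(f"### {level} ({len(entries)} entries)\n" + "\n".join(entries[:20]))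
--     return "\n\n".join(parts)
-- ===== SOURCE B (Python) =====
-- def _format_log_chunks(chunks: list[dict]) -> str:
--     parts = []
--     for level in ["ERROR", "CRITICAL", "FATAL", "WARN", "WARNING", "INFO", "DEBUG", "UNKNOWN"]:
--         entries = [c.get("text", "") for c in chunks if c.get("level", "UNKNOWN") == level]
--         if entries:
--             parts.append(f"### {level} ({len(entries)} entries)\n" + "\n".join(entries[:20]))
--     return "\n\n".join(parts)
-- ===== Notes on version B (the rewrite author's own statement) =====
-- stated objective: simpler
-- what changed: Drops the by_level grouping dict entirely: a single loop over the fixed priority list of levels collects each level's texts by a direct scan of the chunks, replacing the maintained index with per-level filters.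
import Mathlib
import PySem

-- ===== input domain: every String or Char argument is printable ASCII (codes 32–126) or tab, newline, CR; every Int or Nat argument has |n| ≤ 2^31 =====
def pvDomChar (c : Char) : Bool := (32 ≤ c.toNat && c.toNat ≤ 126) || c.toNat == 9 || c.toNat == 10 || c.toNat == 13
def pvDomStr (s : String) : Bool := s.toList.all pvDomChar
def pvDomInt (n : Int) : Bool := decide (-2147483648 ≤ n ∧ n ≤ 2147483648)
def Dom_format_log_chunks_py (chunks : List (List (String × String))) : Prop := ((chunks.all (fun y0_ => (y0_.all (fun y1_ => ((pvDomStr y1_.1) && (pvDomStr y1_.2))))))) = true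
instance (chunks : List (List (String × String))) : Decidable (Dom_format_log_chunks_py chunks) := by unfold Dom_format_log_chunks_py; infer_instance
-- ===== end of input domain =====

-- B drops A's by_level grouping dict: one loop over the fixed level list collects each
-- level's texts by a direct scan of the chunks (objective: simpler; same result).

-- chunk.get(key, dflt) on a Python dict chunk (assoc list; first match)
def pvGet (c : List (String × String)) (k dflt : String) : String :=
  (PySem.Dict.mk c).getD k dflt

-- the fixed priority list of levels (shared literal of both Pythons)
def pvLevels : List String :=
  ["ERROR", "CRITICAL", "FATAL", "WARN", "WARNING", "INFO", "DEBUG", "UNKNOWN"]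

-- f"### {level} ({len(entries)} entries)\n" + "\n".join(entries[:20])  (identical in A and B)
def pvFmt (level : String) (entries : List String) : String :=
  "### " ++ level ++ " (" ++ PySem.Int.toStr (entries.length : Int) ++ " entries)\n"
    ++ PySem.Str.join "\n" (PySem.List.slice entries none (some 20))

-- ===== PORT A =====
def format_log_chunks_py (chunks : List (List (String × String))) : String :=
  let by_level : PySem.Dict String (List String) :=
    chunks.foldl
      (fun d chunk =>
        -- by_level.setdefault(level, []).append(text)
        d.modify (pvGet chunk "level" "UNKNOWN") [] (fun l => l ++ [pvGet chunk "text" ""]))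
      PySem.Dict.empty
  let parts : List String :=
    pvLevels.foldl
      (fun parts level =>
        if by_level.contains level then
          parts ++ [pvFmt level (by_level.getD level [])]
        else parts)
      []
  PySem.Str.join "\n\n" parts

-- ===== PORT B =====
def format_log_chunks_py_alt (chunks : List (List (String × String))) : String :=
  let parts : List String :=
    pvLevels.foldl
      (fun parts level =>
        let entries :=
          (chunks.filter (fun c => pvGet c "level" "UNKNOWN" == level)).map
            (fun c => pvGet c "text" "")
        if entries.isEmpty then parts else parts ++ [pvFmt level entries])
      []
  PySem.Str.join "\n\n" parts

-- ===== PRECONDITION & SPEC =====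
def Spec_format_log_chunks_py (chunks : List (List (String × String))) (out : String) : Prop := out = format_log_chunks_py_alt chunks
instance (chunks : List (List (String × String))) (out : String) : Decidable (Spec_format_log_chunks_py chunks out) := by unfold Spec_format_log_chunks_py; infer_instance

-- ===== CLAIM (what is proved, stated in full; the proofs are below) =====
def Claim_equal_format_log_chunks_py : Prop := ∀ (chunks : List (List (String × String))), Dom_format_log_chunks_py chunks → Spec_format_log_chunks_py chunks (format_log_chunks_py chunks)

-- ===== LEMMAS AND PROOFS =====

-- the grouping dict's value at lv is exactly B's filtered text list
theorem pv_getD_byLevel (chunks : List (List (String × String))) (lv : String) :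
    (chunks.foldl
      (fun d chunk =>
        d.modify (pvGet chunk "level" "UNKNOWN") [] (fun l => l ++ [pvGet chunk "text" ""]))
      PySem.Dict.empty).getD lv []
    = (chunks.filter (fun c => pvGet c "level" "UNKNOWN" == lv)).map
        (fun c => pvGet c "text" "") := by
  have h := PySem.Dict.getD_foldl_modify_append
      (chunks.map (fun c => (pvGet c "level" "UNKNOWN", pvGet c "text" "")))
      (PySem.Dict.empty) lv
  simpa [List.foldl_map, List.filter_map, List.map_map, Function.comp] using h

-- membership in the grouping dict is exactly non-emptiness of B's filter
theorem pv_contains_byLevel (chunks : List (List (String × String))) (lv : String) :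
    (chunks.foldl
      (fun d chunk =>
        d.modify (pvGet chunk "level" "UNKNOWN") [] (fun l => l ++ [pvGet chunk "text" ""]))
      PySem.Dict.empty).contains lv
    = !(chunks.filter (fun c => pvGet c "level" "UNKNOWN" == lv)).isEmpty := by
  rw [Bool.eq_iff_iff]
  rw [PySem.Dict.contains_iff_mem_keys]
  rw [PySem.Dict.keys_foldl_modify_key chunks (fun c => pvGet c "level" "UNKNOWN") []
      (fun _ chunk => (fun l => l ++ [pvGet chunk "text" ""])) PySem.Dict.empty]
  simp only [PySem.Set.mem_update, PySem.Dict.keys_empty, List.not_mem_nil, false_or,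
    List.mem_map, Bool.not_eq_eq_eq_not, Bool.not_true, List.isEmpty_eq_false_iff, ne_eq,
    List.filter_eq_nil_iff, beq_iff_eq, not_forall, not_not]
  constructor
  · rintro ⟨c, hc, rfl⟩; exact ⟨c, hc, rfl⟩
  · rintro ⟨c, hc, rfl⟩; exact ⟨c, hc, rfl⟩

-- ===== VERDICT (by name: the statement is the Claim_ definition above) =====
theorem format_log_chunks_py_spec : Claim_equal_format_log_chunks_py := by
  intro chunks _
  unfold Spec_format_log_chunks_py
  simp only [format_log_chunks_py, format_log_chunks_py_alt]
  congr 1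
  apply PySem.List.foldl_congr_mem
  intro parts level _
  rw [pv_contains_byLevel, pv_getD_byLevel]
  by_cases h : (chunks.filter (fun c => pvGet c "level" "UNKNOWN" == level)).isEmpty
  · simp [h]
  · simp [h]
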